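-- pv_equiv track=rewrite | github.com/AdeebaRafi/MIT_Contest | code-forces/Q2.py | solve
-- ===== SOURCE A (Python) =====
-- def solve(s):
--     if len(s) < 3:  # Minimum length must be 3 (MIT)
--         return "NO"
--
--     i = 0
--     while i < len(s):
--         # Each part must start with 'M'
--         if s[i] != 'M':
--             return "NO"
--         i += 1
--
--         # After M, must have at least one IT
--         found_it = False
--         while i < len(s) - 1:
--             if s[i] == 'I' and s[i + 1] == 'T':
--                 found_it = True
--                 i += 2
--             else:
--                 break
--
--         if not found_it:
--             return "NO"
--
--     # If we've consumed the entire string successfully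
--     return "YES" if i == len(s) else "NO"
-- ===== SOURCE B (Python) =====
-- def solve(s):
--     # Single-pass 4-state DFA for the language (M(IT)+)+ ; -1 is the dead state.
--     state = 0
--     for c in s:
--         if state == 0:
--             state = 1 if c == 'M' else -1
--         elif state == 1:
--             state = 2 if c == 'I' else -1
--         elif state == 2:
--             state = 3 if c == 'T' else -1
--         elif state == 3:
--             state = 2 if c == 'I' else (1 if c == 'M' else -1)
--         else:
--             break
--     return "YES" if state == 3 else "NO"
-- ===== Notes on version B (the rewrite author's own statement) =====
-- stated objective: alternative
-- what changed: Replaced the nested index-walking while loops (outer per-M group, inner consuming IT pairs with lookahead) by a single left-to-right fold through an explicit 4-state DFA for (M(IT)+)+, dropping the len<3 guard.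
import Mathlib
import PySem

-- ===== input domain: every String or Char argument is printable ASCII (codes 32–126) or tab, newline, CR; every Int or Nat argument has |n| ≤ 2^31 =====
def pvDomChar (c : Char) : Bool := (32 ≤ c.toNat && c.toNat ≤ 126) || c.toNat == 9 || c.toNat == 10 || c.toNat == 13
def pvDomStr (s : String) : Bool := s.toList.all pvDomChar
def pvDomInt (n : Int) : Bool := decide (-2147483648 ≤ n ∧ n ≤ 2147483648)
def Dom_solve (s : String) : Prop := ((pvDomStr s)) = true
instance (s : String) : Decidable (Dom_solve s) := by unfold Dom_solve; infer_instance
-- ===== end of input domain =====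

-- B replaces A's nested index-walking loops with a single DFA fold; same cost, different structure.

-- ===== PORT A =====
-- inner while loop: `while i < len(s)-1: if s[i]=='I' and s[i+1]=='T': found=True; i+=2 else break`
-- (indices are in range under the guard, so getElem? is exact Python indexing here)
def solveInner (cs : List Char) (i : Nat) (found : Bool) : Nat × Bool :=
  if h : i < cs.length - 1 then
    if cs[i]? = some 'I' ∧ cs[i+1]? = some 'T' then solveInner cs (i+2) true
    else (i, found)
  else (i, found)
termination_by cs.length - i
decreasing_by
  exact Nat.sub_lt_sub_left (Nat.lt_of_lt_of_le h (Nat.sub_le cs.length 1))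
    (Nat.lt_of_lt_of_le (Nat.lt_succ_self i) (Nat.le_add_right (i+1) 1))

-- result index never decreases (needed for solveOuter's termination)
theorem solveInner_ge (cs : List Char) (i : Nat) (f : Bool) : i ≤ (solveInner cs i f).1 := by
  induction i, f using solveInner.induct cs with
  | case1 i f h hp ih => rw [solveInner]; simp [h, hp]; omega
  | case2 i f h hp => rw [solveInner]; simp [h, hp]
  | case3 i f h => rw [solveInner]; simp [h]

-- outer while loop of A
def solveOuter (cs : List Char) (i : Nat) : String :=
  if h : i < cs.length then
    if cs[i]? ≠ some 'M' then "NO"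
    else
      let r := solveInner cs (i+1) false
      if r.2 = false then "NO" else solveOuter cs r.1
  else if i = cs.length then "YES" else "NO"
termination_by cs.length - i
decreasing_by
  exact Nat.sub_lt_sub_left h
    (Nat.lt_of_lt_of_le (Nat.lt_succ_self i) (solveInner_ge cs (i+1) false))

def solve (s : String) : String :=
  if s.toList.length < 3 then "NO" else solveOuter s.toList 0

-- ===== PORT B =====
def dfaStep (st : Int) (c : Char) : Int :=
  if st = 0 then (if c = 'M' then 1 else -1)
  else if st = 1 then (if c = 'I' then 2 else -1)
  else if st = 2 then (if c = 'T' then 3 else -1)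
  else if st = 3 then (if c = 'I' then 2 else if c = 'M' then 1 else -1)
  else -1

def solve_alt (s : String) : String :=
  if s.toList.foldl dfaStep 0 = 3 then "YES" else "NO"

-- ===== PRECONDITION & SPEC =====
def Spec_solve (s : String) (out : String) : Prop := out = solve_alt s
instance (s : String) (out : String) : Decidable (Spec_solve s out) := by unfold Spec_solve; infer_instance

-- ===== CLAIM (what is proved, stated in full; the proofs are below) =====
def Claim_equal_solve : Prop := ∀ (s : String), Dom_solve s → Spec_solve s (solve s)

-- ===== LEMMAS AND PROOFS =====

-- the inner loop's continue condition
abbrev hitCond (cs : List Char) (i : Nat) : Prop :=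
  i < cs.length - 1 ∧ cs[i]? = some 'I' ∧ cs[i+1]? = some 'T'

theorem foldl_dead (l : List Char) : List.foldl dfaStep (-1) l = -1 := by
  induction l with
  | nil => rfl
  | cons c r ih => simp [List.foldl, dfaStep]; exact ih

theorem solveInner_le (cs : List Char) (i : Nat) (f : Bool) :
    i ≤ cs.length → (solveInner cs i f).1 ≤ cs.length := by
  induction i, f using solveInner.induct cs with
  | case1 i f h1 hp ih => intro _; rw [solveInner]; simp [h1, hp]; exact ih (by omega)
  | case2 i f h1 hp => intro h; rw [solveInner]; simp [h1, hp]; exact h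
  | case3 i f h1 => intro h; rw [solveInner]; simp [h1]; exact h

theorem solveInner_stop (cs : List Char) (i : Nat) (f : Bool) :
    ¬ hitCond cs (solveInner cs i f).1 := by
  induction i, f using solveInner.induct cs with
  | case1 i f h1 hp ih =>
      rw [solveInner]; simp only [h1, hp, and_self, if_true, dite_true]
      exact ih
  | case2 i f h1 hp => rw [solveInner]; simp [h1, hp]
  | case3 i f h1 => rw [solveInner]; simp [h1]

theorem solveInner_found (cs : List Char) (i : Nat) (f : Bool) :
    (solveInner cs i f).2 = (f || decide (hitCond cs i)) := by
  induction i, f using solveInner.induct cs with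
  | case1 i f h1 hp ih =>
      rw [solveInner]; simp only [h1, hp, and_self, if_true, dite_true]
      rw [ih]
      have : decide (hitCond cs i) = true := decide_eq_true ⟨h1, hp.1, hp.2⟩
      simp [this]
  | case2 i f h1 hp =>
      rw [solveInner]; simp only [h1, hp, dite_true]
      have : ¬ hitCond cs i := fun hc => hp ⟨hc.2.1, hc.2.2⟩
      simp [this]
  | case3 i f h1 =>
      rw [solveInner]; simp only [dif_neg h1]
      have : ¬ hitCond cs i := fun hc => h1 hc.1
      simp [this]

-- an in-range pair exposes two cons cells of the dropped suffix
theorem drop_pair (cs : List Char) (i : Nat) (h : i + 1 < cs.length)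
    (hI : cs[i]? = some 'I') (hT : cs[i+1]? = some 'T') :
    cs.drop i = 'I' :: 'T' :: cs.drop (i+2) := by
  have h0 : i < cs.length := by omega
  rw [List.drop_eq_getElem_cons h0, List.drop_eq_getElem_cons h]
  have e0 : cs[i] = 'I' := by have := List.getElem?_eq_getElem h0; rw [this] at hI; exact Option.some.inj hI
  have e1 : cs[i+1] = 'T' := by have := List.getElem?_eq_getElem h; rw [this] at hT; exact Option.some.inj hT
  rw [e0, e1]

-- consuming IT pairs keeps the DFA in state 3
theorem solveInner_foldl (cs : List Char) (i : Nat) (f : Bool) :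
    List.foldl dfaStep 3 (cs.drop i) = List.foldl dfaStep 3 (cs.drop (solveInner cs i f).1) := by
  induction i, f using solveInner.induct cs with
  | case1 i f h1 hp ih =>
      rw [solveInner]; simp only [h1, hp, and_self, if_true, dite_true]
      have hlt : i + 1 < cs.length := by omega
      rw [drop_pair cs i hlt hp.1 hp.2]
      have e2 : List.foldl dfaStep 3 ('I' :: 'T' :: cs.drop (i+2))
          = List.foldl dfaStep 3 (cs.drop (i+2)) := by
        simp [List.foldl, dfaStep]
      rw [e2]; exact ih
  | case2 i f h1 hp => rw [solveInner]; simp [h1, hp]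
  | case3 i f h1 => rw [solveInner]; simp [h1]

-- from state 1 (just after an M), a leading 'I' behaves as from state 3
theorem foldl_one_eq_three (cs : List Char) (i : Nat) (hI : cs[i]? = some 'I') :
    List.foldl dfaStep 1 (cs.drop i) = List.foldl dfaStep 3 (cs.drop i) := by
  have h0 : i < cs.length := by
    by_contra h
    rw [List.getElem?_eq_none (by omega : cs.length ≤ i)] at hI
    simp at hI
  rw [List.drop_eq_getElem_cons h0]
  have e0 : cs[i] = 'I' := by have := List.getElem?_eq_getElem h0; rw [this] at hI; exact Option.some.inj hI
  rw [e0]; simp [List.foldl, dfaStep]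

-- if no IT pair starts at i, state 1 can never reach the accepting state
theorem foldl_one_ne_three (cs : List Char) (i : Nat)
    (hstop : ¬ hitCond cs i) : List.foldl dfaStep 1 (cs.drop i) ≠ 3 := by
  rcases Nat.lt_or_ge i cs.length with h0 | h0
  · rw [List.drop_eq_getElem_cons h0]
    by_cases hI : cs[i] = 'I'
    · rcases Nat.lt_or_ge (i+1) cs.length with h1 | h1
      · rw [List.drop_eq_getElem_cons h1]
        have hT : cs[i+1] ≠ 'T' := by
          intro hT; apply hstop
          unfold hitCond
          refine ⟨by omega, ?_, ?_⟩
          · rw [List.getElem?_eq_getElem h0, hI]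
          · rw [List.getElem?_eq_getElem h1, hT]
        simp [List.foldl, dfaStep, hI, if_neg hT, foldl_dead]
      · have : cs.drop (i+1) = [] := List.drop_eq_nil_of_le (by omega)
        rw [this]; simp [List.foldl, dfaStep, hI]
    · simp [List.foldl, dfaStep, if_neg hI, foldl_dead]
  · rw [List.drop_eq_nil_of_le h0]; simp [List.foldl]

-- main invariant: at each outer-loop entry (no pending IT pair), A's outer loop agrees with a DFA run from state 3
theorem outer_main (cs : List Char) (i : Nat) :
    i ≤ cs.length → ¬ hitCond cs i →
    solveOuter cs i = (if List.foldl dfaStep 3 (cs.drop i) = 3 then "YES" else "NO") := by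
  induction i using solveOuter.induct cs with
  | case1 i h hM =>
      intro hle hstop
      rw [solveOuter, dif_pos h, if_pos hM]
      rw [List.drop_eq_getElem_cons h]
      have hM' : cs[i] ≠ 'M' := by
        intro e; apply hM; rw [List.getElem?_eq_getElem h, e]
      by_cases hI : cs[i] = 'I'
      · rw [hI]
        rcases Nat.lt_or_ge (i+1) cs.length with h1 | h1
        · rw [List.drop_eq_getElem_cons h1]
          have hT : cs[i+1] ≠ 'T' := by
            intro hT; apply hstop
            unfold hitCond
            refine ⟨by omega, ?_, ?_⟩
            · rw [List.getElem?_eq_getElem h, hI]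
            · rw [List.getElem?_eq_getElem h1, hT]
          simp [List.foldl, dfaStep, if_neg hT, foldl_dead]
        · rw [List.drop_eq_nil_of_le (by omega : cs.length ≤ i + 1)]
          simp [List.foldl, dfaStep]
      · simp [List.foldl, dfaStep, hI, if_neg hM', foldl_dead]
  | case2 i h hM r hf =>
      intro hle hstop
      have hr : r = solveInner cs (i+1) false := rfl
      rw [hr] at hf
      rw [solveOuter, dif_pos h, if_neg hM]
      simp only []
      rw [hf]
      have hM' : cs[i] = 'M' := by
        rcases Decidable.not_not.mp hM with e
        rw [List.getElem?_eq_getElem h] at e; exact Option.some.inj e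
      have hnostep : ¬ hitCond cs (i+1) := by
        have hfd := solveInner_found cs (i+1) false
        rw [hf] at hfd
        intro hc
        rw [Bool.false_or, decide_eq_true hc] at hfd
        exact Bool.noConfusion hfd
      rw [List.drop_eq_getElem_cons h, hM']
      have e3 : List.foldl dfaStep 3 ('M' :: cs.drop (i+1))
          = List.foldl dfaStep 1 (cs.drop (i+1)) := by
        simp [List.foldl, dfaStep]
      rw [e3, if_neg (foldl_one_ne_three cs (i+1) hnostep)]
      simp
  | case3 i h hM r hf ih =>
      intro hle hstop
      have hr : r = solveInner cs (i+1) false := rfl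
      rw [hr] at hf ih
      rw [solveOuter, dif_pos h, if_neg hM]
      simp only []
      rw [if_neg hf]
      have hM' : cs[i] = 'M' := by
        rcases Decidable.not_not.mp hM with e
        rw [List.getElem?_eq_getElem h] at e; exact Option.some.inj e
      have hhit : hitCond cs (i+1) := by
        have hfd := solveInner_found cs (i+1) false
        simp only [Bool.false_or] at hfd
        by_contra hc
        rw [hfd, decide_eq_false hc] at hf
        exact hf rfl
      have hle1 : (solveInner cs (i+1) false).1 ≤ cs.length :=
        solveInner_le cs (i+1) false (by omega)
      have hstop1 : ¬ hitCond cs (solveInner cs (i+1) false).1 :=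
        solveInner_stop cs (i+1) false
      rw [ih hle1 hstop1]
      have e1 : List.foldl dfaStep 3 (cs.drop i)
          = List.foldl dfaStep 3 (cs.drop (solveInner cs (i+1) false).1) := by
        rw [List.drop_eq_getElem_cons h, hM']
        have e3 : List.foldl dfaStep 3 ('M' :: cs.drop (i+1))
            = List.foldl dfaStep 1 (cs.drop (i+1)) := by
          simp [List.foldl, dfaStep]
        rw [e3, foldl_one_eq_three cs (i+1) hhit.2.1]
        exact solveInner_foldl cs (i+1) false
      rw [e1]
  | case4 h =>
      intro hle hstop
      rw [solveOuter, dif_neg h]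
      simp [List.drop_eq_nil_of_le (le_refl cs.length)]
  | case5 i h hne =>
      intro hle hstop
      omega

-- a DFA run from state 0 needs at least 3 characters to accept
theorem short_ne_three (cs : List Char) (h : cs.length < 3) :
    List.foldl dfaStep 0 cs ≠ 3 := by
  match cs, h with
  | [], _ => simp [List.foldl]
  | [a], _ =>
      simp only [List.foldl, dfaStep]
      split_ifs <;> omega
  | [a, b], _ =>
      simp only [List.foldl, dfaStep]
      split_ifs <;> omega

-- ===== VERDICT (by name: the statement is the Claim_ definition above) =====
theorem solve_spec : Claim_equal_solve := by
  intro s _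
  unfold Spec_solve solve solve_alt
  set cs := s.toList with hcs
  by_cases hshort : cs.length < 3
  · rw [if_pos hshort, if_neg (short_ne_three cs hshort)]
  · rw [if_neg hshort]
    have h0 : 0 < cs.length := by omega
    by_cases hM : cs[0]? = some 'M'
    · have hM' : cs[0] = 'M' := by
        rw [List.getElem?_eq_getElem h0] at hM; exact Option.some.inj hM
      have hstop : ¬ hitCond cs 0 := by
        intro hc
        unfold hitCond at hc
        rw [List.getElem?_eq_getElem h0, hM'] at hc
        exact absurd (Option.some.inj hc.2.1) (by decide)
      rw [outer_main cs 0 (by omega) hstop]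
      have ecs : cs = 'M' :: cs.drop 1 := by
        have e := List.drop_eq_getElem_cons h0
        rw [hM'] at e; simpa using e
      rw [List.drop_zero]
      conv_rhs => rw [ecs]
      conv_lhs => rw [ecs]
      simp [List.foldl, dfaStep]
    · rw [solveOuter]
      simp only [h0, dif_pos]
      have hM' : cs[0] ≠ 'M' := by
        intro e; apply hM; rw [List.getElem?_eq_getElem h0, e]
      have ecs : cs = cs[0] :: cs.drop 1 := by
        have e := List.drop_eq_getElem_cons h0
        simpa using e
      rw [ecs]
      simp [List.foldl, dfaStep, if_neg hM', foldl_dead]
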